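-- pv_equiv track=rewrite | github.com/theislab/mubind | multibind/datasets/datasets.py | _mismatch
-- ===== SOURCE A (Python) =====
-- import itertools
--
-- def _mismatch(word, letters, num_mismatches):
--     for locs in itertools.combinations(range(len(word)), num_mismatches):
--         this_word = [[char] for char in word]
--         for loc in locs:
--             orig_char = word[loc]
--             this_word[loc] = [l for l in letters if l != orig_char]
--         for poss in itertools.product(*this_word):
--             yield "".join(poss)
-- ===== SOURCE B (Python) =====
-- def _mismatch(word, letters, num_mismatches):
--     # Dynamic programming over word suffixes: rec(i, k) returns, for the suffix
--     # word[i:], one group per set of mismatch positions (in the same lexicographic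
--     # order as A's itertools.combinations), each group holding its variant suffix
--     # strings with earlier positions varying slowest (A's product order). Memoised
--     # on (i, k), so each suffix/budget pair is solved once and shared by every
--     # prefix. No itertools: combinations and product dissolve into the recursion.
--     memo = {}
--     def rec(i, k):
--         key = (i, k)
--         if key in memo:
--             return memo[key]
--         if i == len(word):
--             r = [[""]] if k == 0 else []
--         else:
--             c = word[i]
--             r = []
--             if k >= 1:
--                 alts = [l for l in letters if l != c]
--                 for g in rec(i + 1, k - 1):
--                     r.append([a + s for a in alts for s in g])
--             for g in rec(i + 1, k):
--                 r.append([c + s for s in g])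
--         memo[key] = r
--         return r
--     for g in rec(0, num_mismatches):
--         for s in g:
--             yield s
-- ===== Notes on version B (the rewrite author's own statement) =====
-- stated objective: alternative
-- what changed: B drops itertools entirely: one structural recursion over the word returns, per mismatch-position set (in the same lexicographic order), the group of variants directly, dissolving both the combinations enumeration and the per-combination product into a single recursion; Pre_ excludes negative num_mismatches, where itertools.combinations raises ValueError.
import Mathlib
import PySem

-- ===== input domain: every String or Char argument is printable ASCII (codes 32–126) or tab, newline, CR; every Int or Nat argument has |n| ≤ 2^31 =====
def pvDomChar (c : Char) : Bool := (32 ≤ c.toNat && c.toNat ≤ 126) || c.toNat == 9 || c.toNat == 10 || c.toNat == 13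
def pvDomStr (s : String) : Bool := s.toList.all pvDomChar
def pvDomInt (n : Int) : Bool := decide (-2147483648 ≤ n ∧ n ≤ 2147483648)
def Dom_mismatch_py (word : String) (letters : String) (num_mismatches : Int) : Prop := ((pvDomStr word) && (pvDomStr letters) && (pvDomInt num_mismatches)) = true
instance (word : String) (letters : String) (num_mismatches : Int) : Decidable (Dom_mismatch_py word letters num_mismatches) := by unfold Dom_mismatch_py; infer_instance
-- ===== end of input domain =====

-- B replaces A's combinations-then-product control flow by a single structural
-- recursion over the word that builds the variant groups directly (objective:
-- alternative decomposition, same output order and cost class).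

-- ===== PORT A =====
-- itertools.combinations(l, k) in Python's (lexicographic, increasing) order
def pvCombos (l : List Nat) (k : Nat) : List (List Nat) :=
  match k, l with
  | 0, _ => [[]]
  | _ + 1, [] => []
  | k + 1, x :: xs => (pvCombos xs k).map (fun c => x :: c) ++ pvCombos xs (k + 1)

-- itertools.product(*ls), rightmost factor varying fastest
def pvProd (ls : List (List Char)) : List (List Char) :=
  match ls with
  | [] => [[]]
  | l :: ls => l.flatMap (fun a => (pvProd ls).map (fun t => a :: t))

-- word[loc] with loc drawn from range(len(word)), hence in range: getD is exact here
def mismatch_py (word : String) (letters : String) (num_mismatches : Int) : List String :=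
  let w := word.toList
  (pvCombos (List.range w.length) num_mismatches.toNat).flatMap (fun locs =>
    let thisWord := locs.foldl
      (fun tw loc => tw.set loc ((letters.toList).filter (fun l => l ≠ w.getD loc ' ')))
      (w.map (fun c => [c]))
    (pvProd thisWord).map (fun poss => String.mk poss))

-- ===== PORT B =====
-- Source B's rec(i, k), recursion on the suffix word[i:] (here: the remaining chars);
-- the memo table is dropped: it only caches the call's value, which is unchanged
def bRecS (letters : List Char) (chars : List Char) (k : Int) : List (List String) :=
  match chars with
  | [] => if k = 0 then [[""]] else []
  | c :: rest =>
    (if 1 ≤ k then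
      (bRecS letters rest (k - 1)).map (fun g =>
        (letters.filter (fun l => l ≠ c)).flatMap (fun a => g.map (fun s => String.singleton a ++ s)))
     else [])
    ++ (bRecS letters rest k).map (fun g => g.map (fun s => String.singleton c ++ s))

def mismatch_py_alt (word : String) (letters : String) (num_mismatches : Int) : List String :=
  (bRecS letters.toList word.toList num_mismatches).flatMap (fun g => g)

-- ===== PRECONDITION & SPEC =====
-- Pre_ excludes negative num_mismatches, where itertools.combinations raises ValueError.
def Pre_mismatch_py (word : String) (letters : String) (num_mismatches : Int) : Prop :=
  0 ≤ num_mismatches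
instance (word : String) (letters : String) (num_mismatches : Int) : Decidable (Pre_mismatch_py word letters num_mismatches) := by unfold Pre_mismatch_py; infer_instance

def pvWitness_mismatch_py : String × String × Int := ("ab", "xy", 1)

def Spec_mismatch_py (word : String) (letters : String) (num_mismatches : Int) (out : List String) : Prop := out = mismatch_py_alt word letters num_mismatches
instance (word : String) (letters : String) (num_mismatches : Int) (out : List String) : Decidable (Spec_mismatch_py word letters num_mismatches out) := by unfold Spec_mismatch_py; infer_instance

-- ===== CLAIM (what is proved, stated in full; the proofs are below) =====
def Claim_equal_mismatch_py : Prop := ∀ (word : String) (letters : String) (num_mismatches : Int), Dom_mismatch_py word letters num_mismatches → Pre_mismatch_py word letters num_mismatches → Spec_mismatch_py word letters num_mismatches (mismatch_py word letters num_mismatches)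

-- ===== LEMMAS AND PROOFS =====

def altOf (letters : List Char) (c : Char) : List Char := letters.filter (fun l => l ≠ c)

-- char-list counterpart of bRecS, the proofs' intermediate form
def bRec (letters : List Char) (chars : List Char) (k : Int) : List (List (List Char)) :=
  match chars with
  | [] => if k = 0 then [[[]]] else []
  | c :: rest =>
    (if 1 ≤ k then
      (bRec letters rest (k - 1)).map (fun g =>
        (letters.filter (fun l => l ≠ c)).flatMap (fun a => g.map (fun s => a :: s)))
     else [])
    ++ (bRec letters rest k).map (fun g => g.map (fun s => c :: s))

lemma singleton_append_mk (a : Char) (s : List Char) :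
    String.singleton a ++ String.mk s = String.mk (a :: s) := by
  show String.singleton a ++ String.ofList s = String.ofList (a :: s)
  rw [← List.singleton_append, String.ofList_append]; rfl

lemma bRecS_eq_bRec (letters : List Char) (chars : List Char) (k : Int) :
    bRecS letters chars k = (bRec letters chars k).map (fun g => g.map (fun s => String.mk s)) := by
  induction chars generalizing k with
  | nil =>
    by_cases h : k = 0 <;> simp [bRecS, bRec, h] <;> rfl
  | cons c rest ih =>
    simp only [bRecS, bRec, List.map_append, List.map_map, ih]
    congr 1
    · by_cases h : 1 ≤ k
      · simp only [if_pos h, List.map_map]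
        apply List.map_congr_left
        intro g _
        simp only [Function.comp, List.map_flatMap]
        apply List.flatMap_congr
        intro a _
        simp only [List.map_map, Function.comp]
        apply List.map_congr_left
        intro s _
        exact singleton_append_mk a s
      · simp [if_neg h]
    · apply List.map_congr_left
      intro g _
      simp only [Function.comp, List.map_map]
      apply List.map_congr_left
      intro s _
      exact singleton_append_mk c s

def pvShift (locs : List Nat) : List Nat :=
  locs.filterMap (fun i => if i = 0 then none else some (i - 1))

-- membership view of A's this_word, indexed recursively
def twRec (letters : List Char) (w : List Char) (locs : List Nat) : List (List Char) :=
  match w with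
  | [] => []
  | c :: cs => (if 0 ∈ locs then altOf letters c else [c]) :: twRec letters cs (pvShift locs)

lemma mem_pvShift (locs : List Nat) (i : Nat) : i ∈ pvShift locs ↔ i + 1 ∈ locs := by
  simp only [pvShift, List.mem_filterMap]
  constructor
  · rintro ⟨j, hj, h⟩
    split at h
    · exact absurd h (by simp)
    · have : j - 1 = i := Option.some.inj h
      have : j = i + 1 := by omega
      exact this ▸ hj
  · intro h
    refine ⟨i + 1, h, by simp⟩

lemma foldl_set_getElem? {α : Type} (locs : List Nat) (g : Nat → α) (tw : List α) (i : Nat) :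
    (locs.foldl (fun tw loc => tw.set loc (g loc)) tw)[i]? =
      if i ∈ locs ∧ i < tw.length then some (g i) else tw[i]? := by
  induction locs generalizing tw with
  | nil => simp
  | cons a rest ih =>
    simp only [List.foldl_cons, ih, List.length_set, List.getElem?_set]
    by_cases hir : i ∈ rest <;> by_cases hlt : i < tw.length <;>
      by_cases hia : i = a <;> simp_all <;> omega

lemma twRec_getElem? (letters : List Char) (w : List Char) (locs : List Nat) (i : Nat) :
    (twRec letters w locs)[i]? =
      w[i]?.map (fun c => if i ∈ locs then altOf letters c else [c]) := by
  induction w generalizing locs i with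
  | nil => simp [twRec]
  | cons c cs ih =>
    cases i with
    | zero => simp [twRec]
    | succ n => simp [twRec, ih, mem_pvShift]

lemma foldl_eq_twRec (letters : List Char) (w : List Char) (locs : List Nat)
    (hb : ∀ loc ∈ locs, loc < w.length) :
    locs.foldl (fun tw loc => tw.set loc (altOf letters (w.getD loc ' ')))
      (w.map (fun c => [c])) = twRec letters w locs := by
  apply List.ext_getElem?
  intro i
  rw [foldl_set_getElem? locs (fun loc => altOf letters (w.getD loc ' ')),
    twRec_getElem?]
  by_cases hi : i ∈ locs
  · have hlt : i < w.length := hb i hi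
    have : w.getD i ' ' = w[i] := by
      simp [List.getD_eq_getElem?_getD, List.getElem?_eq_getElem hlt]
    simp [hi, hlt]
  · simp [hi]

lemma pvCombos_mem_sub (l : List Nat) (k : Nat) (c : List Nat) (hc : c ∈ pvCombos l k) :
    ∀ i ∈ c, i ∈ l := by
  induction l generalizing k c with
  | nil =>
    cases k with
    | zero => simp [pvCombos] at hc; subst hc; simp
    | succ k => simp [pvCombos] at hc
  | cons x xs ih =>
    cases k with
    | zero => simp [pvCombos] at hc; subst hc; simp
    | succ k =>
      simp only [pvCombos, List.mem_append, List.mem_map] at hc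
      rcases hc with ⟨c', hc', rfl⟩ | hc
      · intro i hi
        rcases List.mem_cons.mp hi with rfl | h
        · simp
        · simp [ih k c' hc' i h]
      · intro i hi; simp [ih (k + 1) c hc i hi]

lemma pvShift_zero_cons (t : List Nat) : pvShift (0 :: t) = pvShift t := by
  simp [pvShift]

lemma pvShift_map_succ (l : List Nat) : pvShift (l.map Nat.succ) = l := by
  induction l with
  | nil => rfl
  | cons a t ih =>
    simp only [List.map_cons, pvShift, List.filterMap_cons] at ih ⊢
    simp [ih]

lemma pvCombos_map_succ (l : List Nat) (k : Nat) :
    pvCombos (l.map Nat.succ) k = (pvCombos l k).map (List.map Nat.succ) := by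
  induction l generalizing k with
  | nil => cases k <;> simp [pvCombos]
  | cons x xs ih =>
    cases k with
    | zero => simp [pvCombos]
    | succ k => simp [pvCombos, ih, List.map_map, Function.comp]

-- the core correspondence: B's recursion computes, per combination, A's product
lemma bRec_eq (letters : List Char) (w : List Char) (m : Nat) :
    bRec letters w (m : Int) =
      (pvCombos (List.range w.length) m).map (fun locs => pvProd (twRec letters w locs)) := by
  induction w generalizing m with
  | nil =>
    cases m with
    | zero => simp [bRec, pvCombos, twRec, pvProd]
    | succ m =>
      simp only [bRec]
      rw [if_neg (by omega : ¬((m + 1 : Nat) : Int) = 0)]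
      simp [pvCombos]
  | cons c cs ih =>
    have hrange : List.range (cs.length + 1) = 0 :: (List.range cs.length).map Nat.succ :=
      List.range_succ_eq_map
    cases m with
    | zero =>
      have hL : bRec letters (c :: cs) ((0 : Nat) : Int) =
          (bRec letters cs ((0 : Nat) : Int)).map (fun g => g.map (fun s => c :: s)) := by
        simp only [bRec]
        rw [if_neg (by omega : ¬ (1 : Int) ≤ ((0 : Nat) : Int))]
        rfl
      rw [hL, ih 0]
      simp only [pvCombos, List.map_cons, List.map_nil]
      congr 1
      simp [twRec, pvShift, pvProd]
    | succ m =>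
      have h1 : (1 : Int) ≤ ((m + 1 : Nat) : Int) := by omega
      have hsub : ((m + 1 : Nat) : Int) - 1 = (m : Int) := by omega
      simp only [List.length_cons, hrange, pvCombos, pvCombos_map_succ, bRec, if_pos h1,
        hsub, ih m, ih (m + 1), List.map_append, List.map_map]
      congr 1
      · apply List.map_congr_left
        intro locs _
        simp only [Function.comp]
        have h0 : (0 : Nat) ∈ 0 :: locs.map Nat.succ := by simp
        simp only [twRec, if_pos h0, pvShift_zero_cons, pvShift_map_succ, pvProd, altOf]
      · apply List.map_congr_left
        intro locs _
        simp only [Function.comp]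
        have h0 : (0 : Nat) ∉ locs.map Nat.succ := by simp
        simp only [twRec, if_neg h0, pvShift_map_succ, pvProd, List.flatMap_cons,
          List.flatMap_nil, List.append_nil, List.mem_singleton]

-- ===== VERDICT (by name: the statement is the Claim_ definition above) =====
theorem mismatch_py_spec : Claim_equal_mismatch_py := by
  intro word letters num_mismatches _ hpre
  unfold Spec_mismatch_py mismatch_py mismatch_py_alt
  have hk : num_mismatches = (num_mismatches.toNat : Int) := by
    unfold Pre_mismatch_py at hpre; omega
  rw [hk, bRecS_eq_bRec, bRec_eq, List.flatMap_map]
  simp only [List.flatMap_map]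
  apply List.flatMap_congr
  intro locs hlocs
  have hb : ∀ i ∈ locs, i < word.toList.length := fun i hi =>
    List.mem_range.mp (pvCombos_mem_sub _ _ _ hlocs i hi)
  simp only [show ∀ c, List.filter (fun l => decide (l ≠ c)) letters.toList =
      altOf letters.toList c from fun _ => rfl]
  rw [foldl_eq_twRec letters.toList word.toList locs hb]
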